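-- pv_equiv track=rewrite | github.com/betterafter/problem-solving | baekjoon/2512.py | calc
-- ===== SOURCE A (Python) =====
-- def calc(li, mid):
--     result = 0
--     for i in li:
--         if (i < mid):
--             result += i
--         else:
--             result += mid
--
--     return result
-- ===== SOURCE B (Python) =====
-- def calc(li, mid):
--     s = sorted(li)
--     lo, hi = 0, len(s)
--     while lo < hi:
--         m = (lo + hi) // 2
--         if s[m] < mid:
--             lo = m + 1
--         else:
--             hi = m
--     return sum(s[:lo]) + (len(s) - lo) * mid
-- ===== Notes on version B (the rewrite author's own statement) =====
-- stated objective: alternative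
-- what changed: Sorts the list, binary-searches for the first element >= mid (so the branch test runs O(log n) times instead of per element), and returns prefix-sum of the small part plus count*mid; correct because sorting permutes the summands and the capped sum is permutation-invariant.
import Mathlib
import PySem

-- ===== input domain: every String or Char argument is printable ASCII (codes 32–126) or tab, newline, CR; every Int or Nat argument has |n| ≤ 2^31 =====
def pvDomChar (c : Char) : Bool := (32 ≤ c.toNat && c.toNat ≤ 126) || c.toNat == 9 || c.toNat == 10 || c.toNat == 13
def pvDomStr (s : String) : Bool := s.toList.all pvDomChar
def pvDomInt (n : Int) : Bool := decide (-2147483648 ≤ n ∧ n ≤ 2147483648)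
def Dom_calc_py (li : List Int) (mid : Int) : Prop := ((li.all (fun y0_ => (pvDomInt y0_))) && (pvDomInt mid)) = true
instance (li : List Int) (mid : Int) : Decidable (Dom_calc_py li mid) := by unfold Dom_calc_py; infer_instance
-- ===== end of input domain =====

-- B sorts the list, binary-searches the boundary of elements < mid, and returns prefix-sum + count*mid
-- (alternative algorithm; not claimed faster).

-- ===== PORT A =====
def calc_py (li : List Int) (mid : Int) : Int :=
  li.foldl (fun result i => if i < mid then result + i else result + mid) 0

-- ===== PORT B =====
-- the while-loop binary search of Source B; s[m] is in range whenever lo ≤ m < hi ≤ len s,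
-- so the Python index never raises (getD's default is never read inside that range)
def calcBsearch (s : List Int) (mid : Int) (lo hi : Nat) : Nat :=
  if lo < hi then
    let m := (lo + hi) / 2
    if s.getD m 0 < mid then calcBsearch s mid (m + 1) hi
    else calcBsearch s mid lo m
  else lo
termination_by hi - lo
decreasing_by all_goals omega

def calc_py_alt (li : List Int) (mid : Int) : Int :=
  let s := PySem.List.sorted li (fun x => x) false
  let lo := calcBsearch s mid 0 s.length
  (s.take lo).sum + ((s.length : Int) - (lo : Int)) * mid

-- ===== PRECONDITION & SPEC =====
def Spec_calc_py (li : List Int) (mid : Int) (out : Int) : Prop := out = calc_py_alt li mid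
instance (li : List Int) (mid : Int) (out : Int) : Decidable (Spec_calc_py li mid out) := by unfold Spec_calc_py; infer_instance

-- ===== CLAIM (what is proved, stated in full; the proofs are below) =====
def Claim_equal_calc_py : Prop := ∀ (li : List Int) (mid : Int), Dom_calc_py li mid → Spec_calc_py li mid (calc_py li mid)

-- ===== LEMMAS AND PROOFS =====

-- A computes the sum of the capped elements
theorem calcA_shift (mid c : Int) (xs : List Int) :
    xs.foldl (fun result i => if i < mid then result + i else result + mid) c
      = c + xs.foldl (fun result i => if i < mid then result + i else result + mid) 0 := by
  induction xs generalizing c with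
  | nil => simp
  | cons y ys ihy =>
    simp only [List.foldl_cons]
    rw [ihy (if y < mid then c + y else c + mid), ihy (if y < mid then 0 + y else 0 + mid)]
    split <;> ring

theorem calcA_eq_sum_map (li : List Int) (mid : Int) :
    calc_py li mid = (li.map (fun i => if i < mid then i else mid)).sum := by
  induction li with
  | nil => simp [calc_py]
  | cons x xs ih =>
    simp only [calc_py, List.foldl_cons, List.map_cons, List.sum_cons] at *
    rw [calcA_shift, ih]
    split <;> ring

-- binary-search invariant: on a sorted list it returns a boundary index (fuel induction on hi - lo)
theorem calcBsearch_invariant_fuel (s : List Int) (mid : Int)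
    (hs : s.Pairwise (· ≤ ·)) :
    ∀ (n lo hi : Nat), hi - lo ≤ n → lo ≤ hi → hi ≤ s.length →
    (∀ i, i < lo → s.getD i 0 < mid) →
    (∀ i, hi ≤ i → i < s.length → ¬ s.getD i 0 < mid) →
    (calcBsearch s mid lo hi ≤ s.length ∧
     (∀ i, i < calcBsearch s mid lo hi → s.getD i 0 < mid) ∧
     (∀ i, calcBsearch s mid lo hi ≤ i → i < s.length → ¬ s.getD i 0 < mid)) := by
  have hpw : ∀ i j (hi : i < s.length) (hj : j < s.length), i < j → s[i] ≤ s[j] := by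
    intro i j hi hj hij
    exact List.pairwise_iff_getElem.mp hs i j hi hj hij
  intro n
  induction n with
  | zero =>
    intro lo hi hfuel hle hhi hlo hhiP
    have : ¬ lo < hi := by omega
    rw [calcBsearch, if_neg this]
    exact ⟨by omega, hlo, fun i h1 h2 => hhiP i (by omega) h2⟩
  | succ n ih =>
    intro lo hi hfuel hle hhi hlo hhiP
    by_cases hlt : lo < hi
    · rw [calcBsearch, if_pos hlt]
      simp only
      set m := (lo + hi) / 2 with hmdef
      have hmlt : m < s.length := by omega
      by_cases hm : s.getD m 0 < mid
      · rw [if_pos hm]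
        apply ih (m + 1) hi (by omega) (by omega) hhi _ hhiP
        intro i hiM
        by_cases h : i < lo
        · exact hlo i h
        · have hil : i < s.length := by omega
          rcases Nat.lt_or_ge i m with h2 | h2
          · rw [List.getD_eq_getElem s 0 hil]
            calc s[i] ≤ s[m] := hpw i m hil hmlt h2
              _ < mid := by rwa [List.getD_eq_getElem s 0 hmlt] at hm
          · have : i = m := by omega
            subst this; exact hm
      · rw [if_neg hm]
        apply ih lo m (by omega) (by omega) (by omega) hlo
        intro i hiM hil
        rcases Nat.eq_or_lt_of_le hiM with h3 | h3
        · rw [← h3]; exact hm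
        · rw [List.getD_eq_getElem s 0 hil]
          rw [List.getD_eq_getElem s 0 hmlt] at hm
          intro hcon
          exact hm (lt_of_le_of_lt (hpw m i hmlt hil h3) hcon)
    · rw [calcBsearch, if_neg hlt]
      exact ⟨by omega, hlo, fun i h1 h2 => hhiP i (by omega) h2⟩

-- sums of an all-small prefix and an all-capped suffix
theorem map_cap_of_all_lt (mid : Int) (l : List Int) (h : ∀ x ∈ l, x < mid) :
    l.map (fun i => if i < mid then i else mid) = l := by
  induction l with
  | nil => rfl
  | cons y ys ih =>
    simp only [List.map_cons]
    rw [if_pos (h y (List.mem_cons_self)), ih (fun x hx => h x (List.mem_cons_of_mem y hx))]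

theorem map_cap_of_all_ge (mid : Int) (l : List Int) (h : ∀ x ∈ l, ¬ x < mid) :
    (l.map (fun i => if i < mid then i else mid)).sum = (l.length : Int) * mid := by
  induction l with
  | nil => simp
  | cons y ys ih =>
    simp only [List.map_cons, List.sum_cons, List.length_cons]
    rw [if_neg (h y (List.mem_cons_self)), ih (fun x hx => h x (List.mem_cons_of_mem y hx))]
    push_cast; ring

theorem calc_eq (li : List Int) (mid : Int) : calc_py li mid = calc_py_alt li mid := by
  rw [calcA_eq_sum_map]
  unfold calc_py_alt
  set s := PySem.List.sorted li (fun x => x) false with hsdef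
  have hperm : s.Perm li := PySem.List.sorted_perm li (fun x => x) false
  have hs : s.Pairwise (· ≤ ·) := by
    have := PySem.List.sorted_pairwise (key := fun (x : Int) => x) (xs := li)
    simpa using this
  obtain ⟨hkle, hsmall, hbig⟩ :=
    calcBsearch_invariant_fuel s mid hs s.length 0 s.length (by omega) (Nat.zero_le _) le_rfl
      (by intro i h; omega) (by intro i h1 h2; omega)
  set k := calcBsearch s mid 0 s.length with hk
  have hmapsum : (li.map (fun i => if i < mid then i else mid)).sum
      = (s.map (fun i => if i < mid then i else mid)).sum :=
    (List.Perm.sum_eq (List.Perm.map _ hperm)).symm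
  rw [hmapsum, ← List.take_append_drop k s, List.map_append, List.sum_append,
      List.take_append_drop]
  have htake : ∀ x ∈ s.take k, x < mid := by
    intro x hx
    obtain ⟨i, hi, hxe⟩ := List.getElem_of_mem hx
    have hik : i < k := by
      simp at hi; omega
    have : x = s[i]'(by omega) := by
      rw [← hxe]; exact List.getElem_take
    rw [this, ← List.getD_eq_getElem s 0]
    exact hsmall i hik
  have hdrop : ∀ x ∈ s.drop k, ¬ x < mid := by
    intro x hx
    obtain ⟨i, hi, hxe⟩ := List.getElem_of_mem hx
    have hlen : (s.drop k).length = s.length - k := List.length_drop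
    have : x = s[k + i]'(by omega) := by
      rw [← hxe]; exact List.getElem_drop
    rw [this, ← List.getD_eq_getElem s 0]
    exact hbig (k + i) (by omega) (by omega)
  rw [map_cap_of_all_lt mid _ htake, map_cap_of_all_ge mid _ hdrop]
  have : ((s.drop k).length : Int) = (s.length : Int) - (k : Int) := by
    have : (s.drop k).length = s.length - k := List.length_drop
    omega
  rw [this]

-- ===== VERDICT (by name: the statement is the Claim_ definition above) =====
theorem calc_py_spec : Claim_equal_calc_py := by
  intro li mid _
  exact calc_eq li mid
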